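-- pv_equiv track=rewrite | github.com/saifrhman/noise-robust-ocr-pipeline | label_config.py | has_semantic_receipt_labels
-- ===== SOURCE A (Python) =====
-- def normalize_label_name(label: str) -> str:
--     """Normalize a model label to uppercase BIO form."""
--     value = (label or "O").strip().upper()
--     return value or "O"
--
-- def is_generic_label(label: str) -> bool:
--     value = normalize_label_name(label)
--     return value.startswith("LABEL_")
--
-- def has_semantic_receipt_labels(id2label: dict[int, str] | dict[str, str] | None) -> bool:
--     """
--     Check whether a checkpoint has semantic receipt labels instead of generic LABEL_N labels.
--     """
--     if not id2label:
--         return False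
--
--     labels = {normalize_label_name(str(v)) for v in id2label.values()}
--     if not labels:
--         return False
--     if any(is_generic_label(label) for label in labels):
--         return False
--
--     required = {"B-COMPANY", "B-DATE", "B-ADDRESS", "B-TOTAL"}
--     return bool(required.intersection(labels))
-- ===== SOURCE B (Python) =====
-- def normalize_label_name(label: str) -> str:
--     """Normalize a model label to uppercase BIO form."""
--     value = (label or "O").strip().upper()
--     return value or "O"
--
-- def is_generic_label(label: str) -> bool:
--     value = normalize_label_name(label)
--     return value.startswith("LABEL_")
--
-- _REQUIRED = {"B-COMPANY", "B-DATE", "B-ADDRESS", "B-TOTAL"}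
--
-- def has_semantic_receipt_labels(id2label):
--     if not id2label:
--         return False
--     found_required = False
--     for v in id2label.values():
--         name = normalize_label_name(str(v))
--         if is_generic_label(name):
--             return False
--         if name in _REQUIRED:
--             found_required = True
--     return found_required
-- ===== Notes on version B (the rewrite author's own statement) =====
-- stated objective: simpler
-- what changed: Replaced the materialized label set and three separate set-level checks (emptiness, any-generic, set intersection with the required set) by one fused loop over the dict values that returns False immediately on a generic label and threads a found_required flag.
import Mathlib
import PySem

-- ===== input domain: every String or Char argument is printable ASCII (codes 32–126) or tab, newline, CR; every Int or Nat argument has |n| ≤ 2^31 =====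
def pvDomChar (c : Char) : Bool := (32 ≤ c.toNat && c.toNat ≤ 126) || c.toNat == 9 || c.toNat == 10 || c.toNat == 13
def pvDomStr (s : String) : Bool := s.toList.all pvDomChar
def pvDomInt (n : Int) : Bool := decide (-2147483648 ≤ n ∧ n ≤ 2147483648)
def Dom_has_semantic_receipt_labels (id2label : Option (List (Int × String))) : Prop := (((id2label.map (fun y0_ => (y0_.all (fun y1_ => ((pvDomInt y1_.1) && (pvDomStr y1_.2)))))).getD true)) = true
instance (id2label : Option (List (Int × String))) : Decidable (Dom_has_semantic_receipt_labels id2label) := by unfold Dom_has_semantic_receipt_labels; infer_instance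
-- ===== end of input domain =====

-- B replaces A's materialized label set and its three set-level checks by one fused
-- loop over the values threading a found_required flag (objective: simpler).

-- ===== PORT A =====
-- normalize_label_name: (label or "O").strip().upper() or "O"
def pvNormalize (label : String) : String :=
  let value := PySem.Str.upper (PySem.Str.strip (if label = "" then "O" else label))
  if value = "" then "O" else value

-- is_generic_label
def pvIsGeneric (label : String) : Bool :=
  PySem.Str.startswith (pvNormalize label) "LABEL_"

def has_semantic_receipt_labels (id2label : Option (List (Int × String))) : Bool :=
  match id2label with
  | none => false
  | some d =>
    if d.isEmpty then false
    else
      let labels : PySem.Set String := PySem.Set.ofList (d.map (fun kv => pvNormalize kv.2))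
      if labels.isEmpty then false
      else if labels.any (fun l => pvIsGeneric l) then false
      else
        let required : PySem.Set String :=
          PySem.Set.ofList ["B-COMPANY", "B-DATE", "B-ADDRESS", "B-TOTAL"]
        !(PySem.Set.inter required labels).isEmpty

-- ===== PORT B =====
def pvRequired : List String := ["B-COMPANY", "B-DATE", "B-ADDRESS", "B-TOTAL"]

-- the fused loop of Source B: early False on a generic label, otherwise thread the flag
def pvScan : List String → Bool → Bool
  | [], found => found
  | v :: rest, found =>
    let name := pvNormalize v
    if pvIsGeneric name then false
    else pvScan rest (found || pvRequired.contains name)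

def has_semantic_receipt_labels_alt (id2label : Option (List (Int × String))) : Bool :=
  match id2label with
  | none => false
  | some d =>
    if d.isEmpty then false
    else pvScan (d.map (fun kv => kv.2)) false

-- ===== PRECONDITION & SPEC =====
def Spec_has_semantic_receipt_labels (id2label : Option (List (Int × String))) (out : Bool) : Prop := out = has_semantic_receipt_labels_alt id2label
instance (id2label : Option (List (Int × String))) (out : Bool) : Decidable (Spec_has_semantic_receipt_labels id2label out) := by unfold Spec_has_semantic_receipt_labels; infer_instance

-- ===== CLAIM (what is proved, stated in full; the proofs are below) =====
def Claim_equal_has_semantic_receipt_labels : Prop := ∀ (id2label : Option (List (Int × String))), Dom_has_semantic_receipt_labels id2label → Spec_has_semantic_receipt_labels id2label (has_semantic_receipt_labels id2label)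

-- ===== LEMMAS AND PROOFS =====

-- the loop computes: no value normalizes to a generic label, and the flag or some
-- value normalizes into the required set
theorem pvScan_eq (vs : List String) (found : Bool) :
    pvScan vs found =
      ((vs.all fun v => !pvIsGeneric (pvNormalize v)) &&
       (found || vs.any fun v => pvRequired.contains (pvNormalize v))) := by
  induction vs generalizing found with
  | nil => simp [pvScan]
  | cons v rest ih =>
    by_cases h : pvIsGeneric (pvNormalize v) = true
    · simp [pvScan, h]
    · simp only [Bool.not_eq_true] at h
      simp [pvScan, h, ih, Bool.or_assoc]

theorem has_semantic_receipt_labels_spec_aux (d : List (Int × String)) (hd : ¬ d.isEmpty = true) :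
    has_semantic_receipt_labels (some d) = has_semantic_receipt_labels_alt (some d) := by
  simp only [has_semantic_receipt_labels, has_semantic_receipt_labels_alt]
  rw [if_neg hd, if_neg hd, pvScan_eq, Bool.false_or]
  obtain ⟨p, ps, rfl⟩ := List.exists_cons_of_ne_nil (by simpa [List.isEmpty_iff] using hd)
  have hmem : pvNormalize p.2 ∈ PySem.Set.ofList (((p :: ps).map (fun kv => pvNormalize kv.2))) := by
    rw [PySem.Set.mem_ofList]; simp
  have hsetne : ¬ (PySem.Set.ofList (((p :: ps).map (fun kv => pvNormalize kv.2)))).isEmpty = true := by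
    intro h
    rw [List.isEmpty_iff] at h
    rw [h] at hmem
    simp at hmem
  rw [if_neg hsetne]
  rw [Bool.eq_iff_iff]
  by_cases hg : (PySem.Set.ofList (((p :: ps).map (fun kv => pvNormalize kv.2)))).any (fun l => pvIsGeneric l) = true
  · -- some normalized label is generic: both sides are false
    rw [if_pos hg]
    constructor
    · intro h; exact absurd h (by simp)
    · intro h
      rw [List.any_eq_true] at hg
      obtain ⟨l, hl, hlg⟩ := hg
      rw [PySem.Set.mem_ofList, List.mem_map] at hl
      obtain ⟨kv, hkv, rfl⟩ := hl
      rw [Bool.and_eq_true] at h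
      have hall := h.1
      rw [List.all_eq_true] at hall
      have := hall kv.2 (List.mem_map_of_mem hkv)
      simp [hlg] at this
  · rw [if_neg hg]
    rw [List.any_eq_true] at hg
    push Not at hg
    constructor
    · intro h
      -- intersection nonempty → all non-generic ∧ some required
      rw [Bool.not_eq_true', List.isEmpty_eq_false_iff] at h
      obtain ⟨x, hx⟩ : ∃ x, x ∈ PySem.Set.inter (PySem.Set.ofList ["B-COMPANY", "B-DATE", "B-ADDRESS", "B-TOTAL"]) (PySem.Set.ofList (((p :: ps).map (fun kv => pvNormalize kv.2)))) := by
        rcases hq : PySem.Set.inter (PySem.Set.ofList ["B-COMPANY", "B-DATE", "B-ADDRESS", "B-TOTAL"]) (PySem.Set.ofList (((p :: ps).map (fun kv => pvNormalize kv.2)))) with _ | ⟨x, xs⟩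
        · exact absurd hq h
        · exact ⟨x, by rw [hq]; simp⟩
      rw [PySem.Set.mem_inter, PySem.Set.mem_ofList, PySem.Set.mem_ofList] at hx
      obtain ⟨hxr, hxl⟩ := hx
      rw [List.mem_map] at hxl
      obtain ⟨kv, hkv, rfl⟩ := hxl
      rw [Bool.and_eq_true]
      constructor
      · rw [List.all_eq_true]
        intro v hv
        rw [List.mem_map] at hv
        obtain ⟨kw, hkw, rfl⟩ := hv
        have := hg (pvNormalize kw.2) (by rw [PySem.Set.mem_ofList]; exact List.mem_map_of_mem hkw)
        simp [this]
      · rw [List.any_eq_true]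
        refine ⟨kv.2, List.mem_map_of_mem hkv, ?_⟩
        rw [List.contains_iff_mem]
        exact hxr
    · intro h
      rw [Bool.and_eq_true] at h
      obtain ⟨-, hreq⟩ := h
      rw [List.any_eq_true] at hreq
      obtain ⟨v, hv, hr⟩ := hreq
      rw [List.mem_map] at hv
      obtain ⟨kv, hkv, rfl⟩ := hv
      rw [List.contains_iff_mem] at hr
      have hmem' : pvNormalize kv.2 ∈ PySem.Set.inter (PySem.Set.ofList ["B-COMPANY", "B-DATE", "B-ADDRESS", "B-TOTAL"]) (PySem.Set.ofList (((p :: ps).map (fun kv => pvNormalize kv.2)))) := by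
        rw [PySem.Set.mem_inter, PySem.Set.mem_ofList, PySem.Set.mem_ofList]
        exact ⟨hr, List.mem_map_of_mem hkv⟩
      rw [Bool.not_eq_true', List.isEmpty_eq_false_iff]
      intro h
      rw [h] at hmem'
      simp at hmem'

-- ===== VERDICT (by name: the statement is the Claim_ definition above) =====
theorem has_semantic_receipt_labels_spec : Claim_equal_has_semantic_receipt_labels := by
  intro id2label _
  unfold Spec_has_semantic_receipt_labels
  match id2label with
  | none => rfl
  | some d =>
    by_cases hd : d.isEmpty = true
    · simp [has_semantic_receipt_labels, has_semantic_receipt_labels_alt, hd]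
    · exact has_semantic_receipt_labels_spec_aux d hd
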